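-- pv_equiv track=rewrite | github.com/SangonomiyaKoko/Kokomi_Bot | kokomi/scripts/recent/recent.py | achieve
-- ===== SOURCE A (Python) =====
-- def achieve(ships: dict):
--     res_data = {}
--     if ships != {}:
--         achievement_dict = {
--             4277330864: 'PCH016_FirstBlood',
--             4289913776: 'PCH004_Dreadnought',
--             4282573744: 'PCH011_InstantKill',
--             4290962352: 'PCH003_MainCaliber',
--             4287816624: 'PCH006_Withering',
--             4288865200: 'PCH005_Support',
--             4269990832: 'PCH023_Warrior',
--             4283622320: 'PCH010_Retribution',
--             4276282288: 'PCH017_Fireproof',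
--             4281525168: 'PCH012_Arsonist',
--             4273136560: 'PCH020_ATBACaliber',
--             4293059504: 'PCH001_DoubleKill',
--             4111655856: 'PCH174_AirDefenseExpert',
--             4274185136: 'PCH019_Detonated',
--             4279428016: 'PCH014_Headbutt',
--             4292010928: 'PCH002_OneSoldierInTheField',
--             4275233712: 'PCH018_Unsinkable',
--             3879920560: 'PCH395_CombatRecon',
--
--             3910329264: 'PCH366_Warrior_Squad',
--             3909280688: 'PCH367_Support_Squad',
--             3908232112: 'PCH368_Frag_Squad',
--             3912426416: 'PCH364_MainCaliber_Squad',
--             3911377840: 'PCH365_ClassDestroy_Squad'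
--         }
--         ''',
--
--             4004701104: 'PCH276_JollyRogerBronze',
--             4003652528: 'PCH277_JollyRogerSilver',
--             4050838448: 'PCH232_JollyRoger',
--             3910329264: 'PCH366_Warrior_Squad',
--             3909280688: 'PCH367_Support_Squad',
--             3908232112: 'PCH368_Frag_Squad',
--             3912426416: 'PCH364_MainCaliber_Squad',
--             3911377840: 'PCH365_ClassDestroy_Squad'
--             4125287344:'PCH161_CLAN_LEAGUE_4',
--             4126335920:'PCH160_CLAN_LEAGUE_3',
--             4127384496:'PCH159_CLAN_LEAGUE_2',
--             4128433072:'PCH158_CLAN_LEAGUE_1',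
--         '''
--         for id, name in achievement_dict.items():
--             if str(id) in ships:
--                 res_data[name] = ships[str(
--                     id)]['count']
--         return res_data
-- ===== SOURCE B (Python) =====
-- _REV = {
--     '4277330864': 'PCH016_FirstBlood',
--     '4289913776': 'PCH004_Dreadnought',
--     '4282573744': 'PCH011_InstantKill',
--     '4290962352': 'PCH003_MainCaliber',
--     '4287816624': 'PCH006_Withering',
--     '4288865200': 'PCH005_Support',
--     '4269990832': 'PCH023_Warrior',
--     '4283622320': 'PCH010_Retribution',
--     '4276282288': 'PCH017_Fireproof',
--     '4281525168': 'PCH012_Arsonist',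
--     '4273136560': 'PCH020_ATBACaliber',
--     '4293059504': 'PCH001_DoubleKill',
--     '4111655856': 'PCH174_AirDefenseExpert',
--     '4274185136': 'PCH019_Detonated',
--     '4279428016': 'PCH014_Headbutt',
--     '4292010928': 'PCH002_OneSoldierInTheField',
--     '4275233712': 'PCH018_Unsinkable',
--     '3879920560': 'PCH395_CombatRecon',
--     '3910329264': 'PCH366_Warrior_Squad',
--     '3909280688': 'PCH367_Support_Squad',
--     '3908232112': 'PCH368_Frag_Squad',
--     '3912426416': 'PCH364_MainCaliber_Squad',
--     '3911377840': 'PCH365_ClassDestroy_Squad'}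
-- _NAMES = [
--     'PCH016_FirstBlood',
--     'PCH004_Dreadnought',
--     'PCH011_InstantKill',
--     'PCH003_MainCaliber',
--     'PCH006_Withering',
--     'PCH005_Support',
--     'PCH023_Warrior',
--     'PCH010_Retribution',
--     'PCH017_Fireproof',
--     'PCH012_Arsonist',
--     'PCH020_ATBACaliber',
--     'PCH001_DoubleKill',
--     'PCH174_AirDefenseExpert',
--     'PCH019_Detonated',
--     'PCH014_Headbutt',
--     'PCH002_OneSoldierInTheField',
--     'PCH018_Unsinkable',
--     'PCH395_CombatRecon',
--     'PCH366_Warrior_Squad',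
--     'PCH367_Support_Squad',
--     'PCH368_Frag_Squad',
--     'PCH364_MainCaliber_Squad',
--     'PCH365_ClassDestroy_Squad']
--
--
-- def achieve(ships: dict):
--     # one pass over the input against the reverse str(id)->name table ...
--     found = {_REV[k]: v['count'] for k, v in ships.items() if k in _REV}
--     # ... then emit the found achievements in the canonical table order
--     return {n: found[n] for n in _NAMES if n in found}
-- ===== Notes on version B (the rewrite author's own statement) =====
-- stated objective: alternative
-- what changed: B scans the ships dict once against a precomputed str(id)->name reverse table collecting the matched counts, then emits them with a second comprehension over the fixed name list in table order, instead of probing ships for each of the 23 table ids; Pre_ excludes the empty dict, where A falls through and returns None (not a dict) while B returns {}, and inputs where a matched entry lacks a 'count' key (KeyError in both).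
-- outside the precondition, e.g. on achieve({}): A returns None, B returns {}
import Mathlib
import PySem

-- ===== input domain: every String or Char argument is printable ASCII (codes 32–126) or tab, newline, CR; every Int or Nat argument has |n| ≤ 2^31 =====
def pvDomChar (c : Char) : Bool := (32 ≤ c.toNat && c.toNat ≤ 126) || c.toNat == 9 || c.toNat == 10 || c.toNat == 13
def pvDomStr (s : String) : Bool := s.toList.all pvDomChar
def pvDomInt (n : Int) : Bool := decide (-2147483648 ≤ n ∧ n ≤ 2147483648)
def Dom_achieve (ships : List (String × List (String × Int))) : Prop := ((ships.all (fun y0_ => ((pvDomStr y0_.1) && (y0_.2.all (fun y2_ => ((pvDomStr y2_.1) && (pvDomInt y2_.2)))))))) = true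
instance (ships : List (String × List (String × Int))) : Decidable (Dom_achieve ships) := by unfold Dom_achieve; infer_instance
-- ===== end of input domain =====

-- B flips the probe direction: one comprehension pass over ships against a reverse str(id)->name table,
-- then emission in fixed table order (objective: alternative; return value only).


-- ===== PORT A =====
def achTable : List (Int × String) :=
  [(4277330864, "PCH016_FirstBlood"),
   (4289913776, "PCH004_Dreadnought"),
   (4282573744, "PCH011_InstantKill"),
   (4290962352, "PCH003_MainCaliber"),
   (4287816624, "PCH006_Withering"),
   (4288865200, "PCH005_Support"),
   (4269990832, "PCH023_Warrior"),
   (4283622320, "PCH010_Retribution"),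
   (4276282288, "PCH017_Fireproof"),
   (4281525168, "PCH012_Arsonist"),
   (4273136560, "PCH020_ATBACaliber"),
   (4293059504, "PCH001_DoubleKill"),
   (4111655856, "PCH174_AirDefenseExpert"),
   (4274185136, "PCH019_Detonated"),
   (4279428016, "PCH014_Headbutt"),
   (4292010928, "PCH002_OneSoldierInTheField"),
   (4275233712, "PCH018_Unsinkable"),
   (3879920560, "PCH395_CombatRecon"),
   (3910329264, "PCH366_Warrior_Squad"),
   (3909280688, "PCH367_Support_Squad"),
   (3908232112, "PCH368_Frag_Squad"),
   (3912426416, "PCH364_MainCaliber_Squad"),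
   (3911377840, "PCH365_ClassDestroy_Squad")]

-- ships[k]['count']; Pre_achieve guarantees the key is present (Python raises KeyError otherwise)
def shipCount (v : List (String × Int)) : Int := ((PySem.Dict.mk v).get? "count").getD 0

-- literal port of A: loop over the fixed table, probe ships for each str(id), insert into res_data.
-- Python returns None on the empty dict (falls through the `if`); Pre_achieve excludes it.
def achieve (ships : List (String × List (String × Int))) : List (String × Int) :=
  if ships = [] then []
  else
    (achTable.foldl (fun res p =>
        match (PySem.Dict.mk ships).get? (PySem.Int.toStr p.1) with
        | some v => res.insert p.2 (shipCount v)
        | none => res) PySem.Dict.empty).items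

-- ===== PORT B =====
-- B's module constants _REV and _NAMES (literals in Source B)
def revB : PySem.Dict String String :=
  PySem.Dict.mk [
   ("4277330864", "PCH016_FirstBlood"),
   ("4289913776", "PCH004_Dreadnought"),
   ("4282573744", "PCH011_InstantKill"),
   ("4290962352", "PCH003_MainCaliber"),
   ("4287816624", "PCH006_Withering"),
   ("4288865200", "PCH005_Support"),
   ("4269990832", "PCH023_Warrior"),
   ("4283622320", "PCH010_Retribution"),
   ("4276282288", "PCH017_Fireproof"),
   ("4281525168", "PCH012_Arsonist"),
   ("4273136560", "PCH020_ATBACaliber"),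
   ("4293059504", "PCH001_DoubleKill"),
   ("4111655856", "PCH174_AirDefenseExpert"),
   ("4274185136", "PCH019_Detonated"),
   ("4279428016", "PCH014_Headbutt"),
   ("4292010928", "PCH002_OneSoldierInTheField"),
   ("4275233712", "PCH018_Unsinkable"),
   ("3879920560", "PCH395_CombatRecon"),
   ("3910329264", "PCH366_Warrior_Squad"),
   ("3909280688", "PCH367_Support_Squad"),
   ("3908232112", "PCH368_Frag_Squad"),
   ("3912426416", "PCH364_MainCaliber_Squad"),
   ("3911377840", "PCH365_ClassDestroy_Squad")]

def namesB : List String :=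
  ["PCH016_FirstBlood",
   "PCH004_Dreadnought",
   "PCH011_InstantKill",
   "PCH003_MainCaliber",
   "PCH006_Withering",
   "PCH005_Support",
   "PCH023_Warrior",
   "PCH010_Retribution",
   "PCH017_Fireproof",
   "PCH012_Arsonist",
   "PCH020_ATBACaliber",
   "PCH001_DoubleKill",
   "PCH174_AirDefenseExpert",
   "PCH019_Detonated",
   "PCH014_Headbutt",
   "PCH002_OneSoldierInTheField",
   "PCH018_Unsinkable",
   "PCH395_CombatRecon",
   "PCH366_Warrior_Squad",
   "PCH367_Support_Squad",
   "PCH368_Frag_Squad",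
   "PCH364_MainCaliber_Squad",
   "PCH365_ClassDestroy_Squad"]

-- literal port of B (Source B): one comprehension over ships building `found`, then one over _NAMES.
-- Both dict comprehensions produce pairwise-distinct keys on inputs admitted by Pre_achieve
-- (ships keys distinct and _REV injective; _NAMES distinct), so each is exactly its pair list.
def achieve_alt (ships : List (String × List (String × Int))) : List (String × Int) :=
  let found : PySem.Dict String Int :=
    PySem.Dict.mk (ships.filterMap (fun kv =>
      (revB.get? kv.1).map (fun n => (n, ((PySem.Dict.mk kv.2).get? "count").getD 0))))
  namesB.filterMap (fun n => (found.get? n).map (fun c => (n, c)))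

-- ===== PRECONDITION & SPEC =====
-- Pre_ excludes: the empty dict (A returns None, not a dict, where B returns the empty dict);
-- duplicate keys (impossible in a Python dict, only an artefact of the association-list model);
-- and ships entries matching a table id but lacking a 'count' key (KeyError in both Pythons).
def Pre_achieve (ships : List (String × List (String × Int))) : Prop :=
  ships ≠ [] ∧ (ships.map Prod.fst).Nodup ∧
  ∀ p ∈ ships, (revB.get? p.1).isSome → ((PySem.Dict.mk p.2).get? "count").isSome
instance (ships : List (String × List (String × Int))) : Decidable (Pre_achieve ships) := by unfold Pre_achieve; infer_instance

def pvWitness_achieve : (List (String × List (String × Int))) :=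
  [("4277330864", [("count", 3)]), ("foo", [])]

def Spec_achieve (ships : List (String × List (String × Int))) (out : List (String × Int)) : Prop := out = achieve_alt ships
instance (ships : List (String × List (String × Int))) (out : List (String × Int)) : Decidable (Spec_achieve ships out) := by unfold Spec_achieve; infer_instance

-- ===== CLAIM (what is proved, stated in full; the proofs are below) =====
def Claim_equal_achieve : Prop := ∀ (ships : List (String × List (String × Int))), Dom_achieve ships → Pre_achieve ships → Spec_achieve ships (achieve ships)

-- ===== LEMMAS AND PROOFS =====

-- the canonical pair list both programs produce
def canonList (ships : List (String × List (String × Int))) : List (String × Int) :=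
  achTable.filterMap (fun p =>
    ((PySem.Dict.mk ships).get? (PySem.Int.toStr p.1)).map (fun v => (p.2, shipCount v)))

theorem revB_eq : revB = PySem.Dict.mk (achTable.map (fun p => (PySem.Int.toStr p.1, p.2))) := by
  decide

theorem revKeysNodup : ((achTable.map (fun p => (PySem.Int.toStr p.1, p.2))).map Prod.fst).Nodup := by
  decide

theorem sndNodup : (achTable.map Prod.snd).Nodup := by decide

theorem namesB_eq : namesB = achTable.map Prod.snd := by decide

-- any revB entry carrying `name` has the key str(id) of the unique table pair (id, name)
theorem rev_inj {id : Int} {name k n : String}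
    (hmem : (id, name) ∈ achTable) (hget : revB.get? k = some n) (hn : n = name) :
    k = PySem.Int.toStr id := by
  rw [revB_eq] at hget
  have hitems : (k, n) ∈ (achTable.map (fun p => (PySem.Int.toStr p.1, p.2))) :=
    PySem.Dict.mem_items_of_get?_eq_some _ hget
  rcases List.mem_map.mp hitems with ⟨q, hq, hqe⟩
  have h2 : q.2 = name := by cases hqe; exact hn
  have : q = (id, name) := by
    have := List.inj_on_of_nodup_map sndNodup hq hmem
    exact this (by simp [h2])
  cases hqe; rw [this]

theorem rev_get_self {id : Int} {name : String} (hmem : (id, name) ∈ achTable) :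
    revB.get? (PySem.Int.toStr id) = some name := by
  rw [revB_eq]
  apply PySem.Dict.get?_of_mem_items
  · exact List.mem_map.mpr ⟨(id, name), hmem, rfl⟩
  · exact revKeysNodup

-- B's `found` lookup at `name` is exactly A's probe of ships at str(id)
theorem found_get {id : Int} {name : String} (hmem : (id, name) ∈ achTable) :
    ∀ (ships : List (String × List (String × Int))),
      (PySem.Dict.mk (ships.filterMap (fun kv =>
        (revB.get? kv.1).map (fun n => (n, ((PySem.Dict.mk kv.2).get? "count").getD 0))))).get? name =
      ((PySem.Dict.mk ships).get? (PySem.Int.toStr id)).map (fun v => shipCount v) := by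
  intro ships
  induction ships with
  | nil => rfl
  | cons kv rest ih =>
    obtain ⟨k, v⟩ := kv
    cases hrev : revB.get? k with
    | none =>
      have hk : k ≠ PySem.Int.toStr id := by
        intro h; rw [h, rev_get_self hmem] at hrev; cases hrev
      have hbe : (k == PySem.Int.toStr id) = false := by simp [hk]
      simp [hrev, PySem.Dict.get?_mk_cons, hbe, ih]
    | some n =>
      by_cases hn : n = name
      · have hk : k = PySem.Int.toStr id := rev_inj hmem hrev hn
        subst hk; subst hn
        simp [hrev, PySem.Dict.get?_mk_cons, shipCount]
      · have hk : k ≠ PySem.Int.toStr id := by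
          intro h; rw [h, rev_get_self hmem] at hrev
          exact hn (Option.some.inj hrev).symm
        have hbe : (k == PySem.Int.toStr id) = false := by simp [hk]
        have hne : (n == name) = false := by simp [hn]
        simp [hrev, PySem.Dict.get?_mk_cons, hbe, hne, ih]

-- B computes canonList
theorem alt_eq_canon (ships : List (String × List (String × Int))) :
    achieve_alt ships = canonList ships := by
  unfold achieve_alt canonList
  rw [namesB_eq, List.filterMap_map]
  apply List.filterMap_congr
  intro p hp
  have := found_get (id := p.1) (name := p.2) (by simpa using hp) ships
  simp only [Function.comp, this]
  cases (PySem.Dict.mk ships).get? (PySem.Int.toStr p.1) <;> rfl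

-- A's conditional-insert loop is an insert loop over canonList
theorem foldA_eq (ships : List (String × List (String × Int))) :
    ∀ (t : List (Int × String)) (d : PySem.Dict String Int),
      t.foldl (fun res p =>
          match (PySem.Dict.mk ships).get? (PySem.Int.toStr p.1) with
          | some v => res.insert p.2 (shipCount v)
          | none => res) d =
      (t.filterMap (fun p =>
          ((PySem.Dict.mk ships).get? (PySem.Int.toStr p.1)).map (fun v => (p.2, shipCount v)))).foldl
        (fun res q => res.insert q.1 q.2) d := by
  intro t
  induction t with
  | nil => intro d; rfl
  | cons p rest ih =>
    intro d
    cases hget : (PySem.Dict.mk ships).get? (PySem.Int.toStr p.1) with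
    | some v => simp [hget, ih]
    | none => simp [hget, ih]

-- the keys of any prefix of canonList are a sub-sequence of the table's names
theorem canon_fst_sublist (ships : List (String × List (String × Int))) (t : List (Int × String)) :
    ((t.filterMap (fun p =>
        ((PySem.Dict.mk ships).get? (PySem.Int.toStr p.1)).map (fun v => (p.2, shipCount v)))).map
      Prod.fst).Sublist (t.map Prod.snd) := by
  induction t with
  | nil => simp
  | cons p rest ih =>
    cases hget : (PySem.Dict.mk ships).get? (PySem.Int.toStr p.1) with
    | some v =>
      simpa [List.filterMap_cons, hget] using List.Sublist.cons₂ p.2 ih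
    | none =>
      simpa [List.filterMap_cons, hget] using List.Sublist.cons p.2 ih

-- A computes canonList (on a nonempty input)
theorem a_eq_canon (ships : List (String × List (String × Int))) (hne : ships ≠ []) :
    achieve ships = canonList ships := by
  have hnd : ((achTable.filterMap (fun p =>
      ((PySem.Dict.mk ships).get? (PySem.Int.toStr p.1)).map (fun v => (p.2, shipCount v)))).map
      Prod.fst).Nodup :=
    (canon_fst_sublist ships achTable).nodup sndNodup
  unfold achieve canonList
  rw [if_neg hne, foldA_eq,
      PySem.Dict.items_foldl_insert_fresh _ Prod.fst Prod.snd PySem.Dict.empty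
        (fun a _ => PySem.Dict.contains_empty _) hnd]
  simp only [PySem.Dict.empty, List.nil_append, Prod.mk.eta, List.map_id']

-- ===== VERDICT (by name: the statement is the Claim_ definition above) =====
theorem achieve_spec : Claim_equal_achieve := by
  intro ships _ hpre
  unfold Spec_achieve
  rw [a_eq_canon ships hpre.1, alt_eq_canon]
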